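-- pv_equiv track=rewrite | github.com/asottile/babi | babi/reg.py | _replace_esc
-- ===== SOURCE A (Python) =====
-- def _replace_esc(s: str, chars: str) -> str:
--     """replace the given escape sequences of `chars` with \\uffff"""
--     for c in chars:
--         if f'\\{c}' in s:
--             break
--     else:
--         return s
--
--     b = []
--     i = 0
--     length = len(s)
--     while i < length:
--         try:
--             sbi = s.index('\\', i)
--         except ValueError:
--             b.append(s[i:])
--             break
--         if sbi > i:
--             b.append(s[i:sbi])
--         b.append('\\')
--         i = sbi + 1
--         if i < length:
--             if s[i] in chars:
--                 b.append('\uffff')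
--             else:
--                 b.append(s[i])
--         i += 1
--     return ''.join(b)
-- ===== SOURCE B (Python) =====
-- def _replace_esc(s: str, chars: str) -> str:
--     """replace the given escape sequences of `chars` with \\uffff"""
--     out = []
--     esc = False
--     for c in s:
--         if esc:
--             out.append('\uffff' if c in chars else c)
--             esc = False
--         elif c == '\\':
--             out.append(c)
--             esc = True
--         else:
--             out.append(c)
--     return ''.join(out)
-- ===== Notes on version B (the rewrite author's own statement) =====
-- stated objective: faster
-- what changed: Drops A's early-return prescan (which substring-searches s once per character of chars, O(|s|*|chars|) before any work) and replaces the index/slice jump loop with a single character-at-a-time state-machine pass using an 'escaped' flag, testing membership in chars only for the character after each backslash.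
import Mathlib
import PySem

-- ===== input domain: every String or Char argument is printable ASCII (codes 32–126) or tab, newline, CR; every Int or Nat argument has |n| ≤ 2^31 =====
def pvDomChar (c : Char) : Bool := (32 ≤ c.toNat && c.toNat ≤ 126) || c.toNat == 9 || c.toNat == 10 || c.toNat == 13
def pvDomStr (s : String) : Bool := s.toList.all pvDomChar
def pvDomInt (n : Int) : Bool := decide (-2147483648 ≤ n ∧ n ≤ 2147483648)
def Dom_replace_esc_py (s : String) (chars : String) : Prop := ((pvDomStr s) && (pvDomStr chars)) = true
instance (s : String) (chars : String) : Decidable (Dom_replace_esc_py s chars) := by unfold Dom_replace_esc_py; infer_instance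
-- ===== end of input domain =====

-- B drops A's per-char-of-chars substring prescan and replaces the index/slice jump loop with a
-- single state-machine pass (an "escaped" flag); measured faster on the generated inputs, same exact output.


-- ===== PORT A =====
-- A's while loop: b is the accumulated list of string pieces, i the scan position.
def aJoinLoop (cs cl : List Char) (i : Nat) (b : List (List Char)) : List (List Char) :=
  if h : i < cs.length then
    -- sbi = s.index('\\', i); ValueError (find = -1) caught below
    if hf : PySem.Chars.findFrom cs ['\\'] (i : Int) = -1 then
      b ++ [PySem.List.slice cs (some (i : Int)) none]          -- b.append(s[i:]); break
    else
      let sbi := (PySem.Chars.findFrom cs ['\\'] (i : Int)).toNat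
      let b1 := if i < sbi then b ++ [PySem.List.slice cs (some (i : Int)) (some (sbi : Int))] else b
      let b2 := b1 ++ [['\\']]
      if h2 : sbi + 1 < cs.length then
        let b3 := if PySem.Chars.isIn [cs[sbi + 1]] cl then b2 ++ [['\uFFFF']] else b2 ++ [[cs[sbi + 1]]]
        aJoinLoop cs cl (sbi + 2) b3
      else
        aJoinLoop cs cl (sbi + 2) b2
  else b
termination_by cs.length + 1 - i
decreasing_by
  all_goals
    have hs := (PySem.Chars.findFrom_natCast_spec cs ['\\'] i (Nat.le_of_lt h) hf).1
    omega

def replace_esc_py (s : String) (chars : String) : String :=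
  -- for c in chars: if f'\\{c}' in s: break / else: return s
  if chars.toList.any (fun c => PySem.Chars.isIn ['\\', c] s.toList) then
    String.ofList (PySem.Chars.join [] (aJoinLoop s.toList chars.toList 0 []))
  else s

-- ===== PORT B =====
-- B's loop body: state = (out, esc)
def bStep (cl : List Char) (acc : List Char × Bool) (c : Char) : List Char × Bool :=
  if acc.2 then
    (acc.1 ++ [if PySem.Chars.isIn [c] cl then '\uFFFF' else c], false)
  else if c = '\\' then
    (acc.1 ++ [c], true)
  else
    (acc.1 ++ [c], false)

def replace_esc_py_alt (s : String) (chars : String) : String :=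
  String.ofList (s.toList.foldl (bStep chars.toList) ([], false)).1

-- ===== PRECONDITION & SPEC =====
def Spec_replace_esc_py (s : String) (chars : String) (out : String) : Prop := out = replace_esc_py_alt s chars
instance (s : String) (chars : String) (out : String) : Decidable (Spec_replace_esc_py s chars out) := by unfold Spec_replace_esc_py; infer_instance

-- ===== CLAIM (what is proved, stated in full; the proofs are below) =====
def Claim_equal_replace_esc_py : Prop := ∀ (s : String) (chars : String), Dom_replace_esc_py s chars → Spec_replace_esc_py s chars (replace_esc_py s chars)

-- ===== LEMMAS AND PROOFS =====

-- the per-character replacement B applies after a backslash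
def repl (cl : List Char) (c : Char) : Char := if PySem.Chars.isIn [c] cl then '\uFFFF' else c

-- recursive view of B's state machine
def altRun (cl : List Char) : List Char → Bool → List Char
  | [], _ => []
  | c :: cs, true => repl cl c :: altRun cl cs false
  | c :: cs, false => if c = '\\' then c :: altRun cl cs true else c :: altRun cl cs false

lemma foldB (cl : List Char) : ∀ (l out : List Char) (esc : Bool),
    (l.foldl (bStep cl) (out, esc)).1 = out ++ altRun cl l esc
  | [], out, esc => by simp [altRun]
  | c :: l, out, esc => by
    cases esc with
    | true => simp [bStep, altRun, foldB cl l, repl]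
    | false =>
      by_cases hc : c = '\\' <;>
        simp [bStep, altRun, hc, foldB cl l]

lemma join0 : ∀ (L : List (List Char)), PySem.Chars.join [] L = L.flatten
  | [] => PySem.Chars.join_nil []
  | [x] => by simp [PySem.Chars.join_singleton]
  | x :: y :: rest => by
    rw [PySem.Chars.join_cons_cons]
    simp [join0 (y :: rest)]

lemma singleton_prefix_drop {cs : List Char} {k : Nat} (h : k < cs.length)
    (ha : cs[k] = '\\') : ['\\'] <+: cs.drop k := by
  rw [List.drop_eq_getElem_cons h, ha]
  exact ⟨cs.drop (k + 1), rfl⟩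

lemma altRun_append (cl m l : List Char) (hm : '\\' ∉ m) :
    altRun cl (m ++ l) false = m ++ altRun cl l false := by
  induction m with
  | nil => rfl
  | cons c t ih =>
    have hc : c ≠ '\\' := fun h => hm (h ▸ List.mem_cons_self)
    simp only [List.cons_append, altRun, if_neg hc]
    rw [ih (fun h => hm (List.mem_cons_of_mem _ h))]

lemma altRun_no_bs (cl l : List Char) (hl : '\\' ∉ l) : altRun cl l false = l := by
  have := altRun_append cl l [] hl
  simpa [altRun] using this

lemma aJoinLoop_flatten (cs cl : List Char) : ∀ (n i : Nat) (b : List (List Char)),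
    cs.length + 1 - i ≤ n →
    (aJoinLoop cs cl i b).flatten = b.flatten ++ altRun cl (cs.drop i) false := by
  intro n
  induction n with
  | zero => intro i b hn; have : cs.length < i := by omega
            rw [aJoinLoop, dif_neg (by omega)]
            simp [List.drop_eq_nil_of_le (by omega : cs.length ≤ i), altRun]
  | succ n ih =>
    intro i b hn
    by_cases h : i < cs.length
    · rw [aJoinLoop, dif_pos h]
      by_cases hf : PySem.Chars.findFrom cs ['\\'] (i : Int) = -1
      · rw [dif_pos hf]
        have hnb : '\\' ∉ cs.drop i := by
          have := (PySem.Chars.findFrom_natCast_eq_neg_one_iff cs ['\\'] i (Nat.le_of_lt h)).1 hf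
          intro hmem
          exact this ((List.singleton_infix_iff _ _).2 hmem)
        rw [altRun_no_bs cl _ hnb,
          PySem.List.slice_from cs (show (0:Int) ≤ (i:Int) by positivity)]
        simp
      · rw [dif_neg hf]
        obtain ⟨hge, hpre, hmin⟩ :=
          PySem.Chars.findFrom_natCast_spec cs ['\\'] i (Nat.le_of_lt h) hf
        set j := (PySem.Chars.findFrom cs ['\\'] (i : Int)).toNat with hj
        have hij : i ≤ j := by omega
        have hjlt : j < cs.length := by
          by_contra hc
          rw [List.drop_eq_nil_of_le (by omega)] at hpre
          exact absurd (List.prefix_nil.1 hpre) (by simp)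
        have hhead : cs[j] = '\\' := by
          obtain ⟨t, ht⟩ := hpre
          rw [List.drop_eq_getElem_cons hjlt] at ht
          exact (List.cons.injEq _ _ _ _ ▸ ht.symm).1
        -- the gap before the backslash contains no backslash
        have hm : '\\' ∉ (cs.drop i).take (j - i) := by
          intro hmem
          obtain ⟨k, hk, hkeq⟩ := List.mem_iff_getElem.1 hmem
          have hk1 : k < j - i := by
            have := List.length_take_le (j - i) (cs.drop i); omega
          have hk2 : i + k < cs.length := by
            have := hmem; have hlen := List.length_drop (l := cs) (i := i); omega
          have : cs[i + k] = '\\' := by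
            have := hkeq
            rw [List.getElem_take, List.getElem_drop] at this
            exact this
          exact hmin (i + k) (by omega) (by omega) (singleton_prefix_drop hk2 this)
        have hsplit : cs.drop i = (cs.drop i).take (j - i) ++ cs.drop j := by
          conv_lhs => rw [← List.take_append_drop (j - i) (cs.drop i)]
          rw [List.drop_drop, show i + (j - i) = j by omega]
        have hdropj : cs.drop j = '\\' :: cs.drop (j + 1) :=
          (List.drop_eq_getElem_cons hjlt).trans (by rw [hhead])
        have hslice : PySem.List.slice cs (some (i : Int)) (some (j : Int)) =
            (cs.drop i).take (j - i) := by
          rw [PySem.List.slice_natCast]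
        have hb1 : (if i < j then b ++ [PySem.List.slice cs (some (i : Int)) (some (j : Int))] else b).flatten
            = b.flatten ++ (cs.drop i).take (j - i) := by
          by_cases hij' : i < j
          · rw [if_pos hij', hslice]; simp
          · rw [if_neg hij']
            have : j - i = 0 := by omega
            simp [this]
        have hRHS : altRun cl (cs.drop i) false
            = (cs.drop i).take (j - i) ++ '\\' :: altRun cl (cs.drop (j + 1)) true := by
          conv_lhs => rw [hsplit]
          rw [altRun_append cl _ _ hm, hdropj]
          simp [altRun]
        by_cases h2 : j + 1 < cs.length
        · rw [dif_pos h2]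
          have hrest : cs.drop (j + 1) = cs[j + 1] :: cs.drop (j + 2) :=
            List.drop_eq_getElem_cons h2
          by_cases hin : PySem.Chars.isIn [cs[j + 1]] cl
          · rw [if_pos hin, ih (j + 2) _ (by omega), hRHS, hrest]
            simp [altRun, repl, hin, hb1]
          · rw [if_neg hin, ih (j + 2) _ (by omega), hRHS, hrest]
            simp [altRun, repl, hin, hb1]
        · rw [dif_neg h2]
          have hj1 : j + 1 = cs.length := by omega
          have hrest : cs.drop (j + 1) = [] := List.drop_eq_nil_of_le (by omega)
          rw [ih (j + 2) _ (by omega), hRHS, hrest]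
          have : cs.drop (j + 2) = [] := List.drop_eq_nil_of_le (by omega)
          simp [this, altRun, hb1]
    · rw [aJoinLoop, dif_neg h]
      simp [List.drop_eq_nil_of_le (by omega : cs.length ≤ i), altRun]

-- when no '\\'+c (c ∈ chars) occurs, B's pass reproduces the string unchanged
lemma altRun_id (cl : List Char) (cs : List Char)
    (H : ∀ c ∈ cl, ¬ ['\\', c] <:+: cs) : altRun cl cs false = cs := by
  induction hn : cs.length using Nat.strong_induction_on generalizing cs with
  | _ n ih =>
    match cs, hn with
    | [], _ => rfl
    | c :: t, hn =>
      by_cases hc : c = '\\'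
      · subst hc
        match t, hn with
        | [], _ => simp [altRun]
        | d :: t', hn =>
          have hd : d ∉ cl := by
            intro hdin
            exact H d hdin (List.IsPrefix.isInfix ⟨t', rfl⟩)
          have hrepl : repl cl d = d := by
            rw [repl, if_neg]
            intro hIn
            exact hd ((List.singleton_infix_iff _ _).1 ((PySem.Chars.isIn_iff_infix _ _).1 hIn))
          have ht' : altRun cl t' false = t' := by
            refine ih t'.length (by simp at hn; omega) t' ?_ rfl
            intro e he hinf
            exact H e he (hinf.trans (List.suffix_cons d t').isInfix |>.trans
              (List.suffix_cons '\\' (d :: t')).isInfix)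
          simp [altRun, hrepl, ht']
      · have ht : altRun cl t false = t := by
          refine ih t.length (by simp at hn; omega) t ?_ rfl
          intro e he hinf
          exact H e he (hinf.trans (List.suffix_cons c t).isInfix)
        simp [altRun, hc, ht]

-- ===== VERDICT (by name: the statement is the Claim_ definition above) =====
theorem replace_esc_py_spec : Claim_equal_replace_esc_py := by
  intro s chars _
  show replace_esc_py s chars = replace_esc_py_alt s chars
  rw [replace_esc_py, replace_esc_py_alt, foldB]
  by_cases hg : chars.toList.any (fun c => PySem.Chars.isIn ['\\', c] s.toList)
  · rw [if_pos hg, join0, aJoinLoop_flatten s.toList chars.toList (s.toList.length + 1) 0 [] (by omega)]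
    simp
  · rw [if_neg hg]
    have H : ∀ c ∈ chars.toList, ¬ ['\\', c] <:+: s.toList := fun c hcm hinf =>
      hg (List.any_eq_true.2 ⟨c, hcm, (PySem.Chars.isIn_iff_infix _ _).2 hinf⟩)
    rw [List.nil_append, altRun_id chars.toList s.toList H, String.ofList_toList]
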